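-- pv_equiv track=rewrite | github.com/gkno/gkno_launcher | src/gkno/dataChecking.py | determineToolWriteOrder
-- ===== SOURCE A (Python) =====
-- def determineToolWriteOrder(workflow, toolsOutputtingToStream, hasPipes):
--   taskBlock  = []
--   taskBlocks = []
--   for task in workflow:
--
--     # Add the task to a task block.
--     taskBlock.append(task)
--
--     # If the task outputs to a file (i.e. it is not listed as outputting to a stream,
--     # the block of piped tasks is complete, so add the task to the list of task
--     # blocks and reset the block.
--     if hasPipes:
--       if task not in toolsOutputtingToStream:
--         taskBlocks.append(taskBlock)
--         taskBlock = []
--     else: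
--       taskBlocks.append(taskBlock)
--       taskBlock = []
--
--   return taskBlocks
-- ===== SOURCE B (Python) =====
-- def determineToolWriteOrder(workflow, toolsOutputtingToStream, hasPipes):
--     if not hasPipes:
--         return [[task] for task in workflow]
--     # Pipe case: repeatedly split off the prefix ending at the first task that
--     # does not output to a stream; a trailing run of streaming tasks is dropped.
--     blocks = []
--     rest = list(workflow)
--     while rest:
--         i = 0
--         while i < len(rest) and rest[i] in toolsOutputtingToStream:
--             i += 1
--         if i == len(rest):
--             break
--         blocks.append(rest[:i + 1])
--         rest = rest[i + 1:]
--     return blocks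
-- ===== Notes on version B (the rewrite author's own statement) =====
-- stated objective: alternative
-- what changed: B handles the no-pipes case as a direct singleton map and, in the pipe case, replaces A's accumulator fold with a split-at-first-boundary recursion (find the first non-streaming task, emit the slice up to and including it, recurse on the remainder, naturally dropping a trailing streaming run).
import Mathlib
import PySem

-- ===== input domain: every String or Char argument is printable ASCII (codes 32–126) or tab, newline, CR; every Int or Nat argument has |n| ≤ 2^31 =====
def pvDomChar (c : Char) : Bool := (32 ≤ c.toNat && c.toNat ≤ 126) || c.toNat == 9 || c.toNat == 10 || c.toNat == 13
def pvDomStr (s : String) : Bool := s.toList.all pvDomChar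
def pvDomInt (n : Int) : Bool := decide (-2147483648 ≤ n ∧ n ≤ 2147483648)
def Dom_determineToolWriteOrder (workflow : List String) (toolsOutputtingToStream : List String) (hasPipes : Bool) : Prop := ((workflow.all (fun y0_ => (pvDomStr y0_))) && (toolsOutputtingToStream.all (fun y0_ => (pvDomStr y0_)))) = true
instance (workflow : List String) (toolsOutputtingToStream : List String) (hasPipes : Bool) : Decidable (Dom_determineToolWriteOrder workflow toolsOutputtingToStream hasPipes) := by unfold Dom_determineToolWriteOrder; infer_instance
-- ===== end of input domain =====

-- ===== PORT A =====
-- B restructures A: singleton map when hasPipes is false, split-at-first-boundary recursion otherwise (objective: alternative decomposition).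
def determineToolWriteOrder (workflow : List String) (toolsOutputtingToStream : List String) (hasPipes : Bool) : List (List String) :=
  (workflow.foldl (fun (acc : List String × List (List String)) task =>
      let taskBlock := acc.1 ++ [task]
      if hasPipes then
        if toolsOutputtingToStream.contains task then (taskBlock, acc.2)
        else ([], acc.2 ++ [taskBlock])
      else ([], acc.2 ++ [taskBlock])) ([], [])).2

-- ===== PORT B =====
-- inner while-loop of Source B: split off the block ending at the first non-streaming task, recurse on the rest
def pvAltGo (s : List String) (rest : List String) : List (List String) :=
  let i := (rest.takeWhile (fun t => s.contains t)).length
  if h : i = rest.length then []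
  else (rest.take (i + 1)) :: pvAltGo s (rest.drop (i + 1))
termination_by rest.length
decreasing_by
  have hle : (rest.takeWhile (fun t => s.contains t)).length ≤ rest.length := (List.takeWhile_sublist _).length_le
  simp only [List.length_drop]
  omega

def determineToolWriteOrder_alt (workflow : List String) (toolsOutputtingToStream : List String) (hasPipes : Bool) : List (List String) :=
  if !hasPipes then workflow.map (fun task => [task])
  else pvAltGo toolsOutputtingToStream workflow

-- ===== PRECONDITION & SPEC =====
def Spec_determineToolWriteOrder (workflow : List String) (toolsOutputtingToStream : List String) (hasPipes : Bool) (out : List (List String)) : Prop := out = determineToolWriteOrder_alt workflow toolsOutputtingToStream hasPipes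
instance (workflow : List String) (toolsOutputtingToStream : List String) (hasPipes : Bool) (out : List (List String)) : Decidable (Spec_determineToolWriteOrder workflow toolsOutputtingToStream hasPipes out) := by unfold Spec_determineToolWriteOrder; infer_instance

-- ===== CLAIM (what is proved, stated in full; the proofs are below) =====
def Claim_equal_determineToolWriteOrder : Prop := ∀ (workflow : List String) (toolsOutputtingToStream : List String) (hasPipes : Bool), Dom_determineToolWriteOrder workflow toolsOutputtingToStream hasPipes → Spec_determineToolWriteOrder workflow toolsOutputtingToStream hasPipes (determineToolWriteOrder workflow toolsOutputtingToStream hasPipes)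

-- ===== LEMMAS AND PROOFS =====
-- pvAltGo with a pending partial block prepended to the first emitted block
def pvPgo (s : List String) (p : List String) (rest : List String) : List (List String) :=
  let i := (rest.takeWhile (fun t => s.contains t)).length
  if i = rest.length then []
  else (p ++ rest.take (i + 1)) :: pvAltGo s (rest.drop (i + 1))

theorem pvPgo_nil (s rest : List String) : pvPgo s [] rest = pvAltGo s rest := by
  rw [pvAltGo, pvPgo]
  split <;> simp_all

theorem pvFoldA_pipe' (s : List String) : ∀ (rest p : List String) (d : List (List String)),
    (List.foldl (fun (acc : List String × List (List String)) task =>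
      let taskBlock := acc.1 ++ [task]
      if s.contains task then (taskBlock, acc.2)
      else ([], acc.2 ++ [taskBlock])) (p, d) rest).2 = d ++ pvPgo s p rest := by
  intro rest
  induction rest with
  | nil => intro p d; simp [pvPgo]
  | cons t ts ih =>
    intro p d
    by_cases h : s.contains t = true
    · simp only [List.foldl_cons, h, if_pos]
      rw [ih]
      simp only [pvPgo, List.takeWhile_cons, h, if_pos, List.length_cons]
      have hle : (ts.takeWhile (fun t => s.contains t)).length ≤ ts.length :=
        (List.takeWhile_sublist _).length_le
      by_cases h2 : (ts.takeWhile (fun t => s.contains t)).length = ts.length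
      · simp [*]
      · have : ¬ ((ts.takeWhile (fun t => s.contains t)).length + 1 = ts.length + 1) := by omega
        simp [*, List.take_succ_cons, List.drop_succ_cons]
    · simp only [List.foldl_cons, h, if_neg, Bool.false_eq_true, not_false_iff]
      rw [ih [], pvPgo_nil]
      have h' : t ∉ s := by simpa using h
      simp [pvPgo, h']

theorem pvFoldA_nopipe : ∀ (rest : List String) (d : List (List String)),
    (List.foldl (fun (acc : List String × List (List String)) task =>
      ([], acc.2 ++ [acc.1 ++ [task]])) (([] : List String), d) rest).2
    = d ++ rest.map (fun t => [t]) := by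
  intro rest
  induction rest with
  | nil => simp
  | cons t ts ih => intro d; simp [ih]

-- ===== VERDICT (by name: the statement is the Claim_ definition above) =====
theorem determineToolWriteOrder_spec : Claim_equal_determineToolWriteOrder := by
  intro workflow s hasPipes _
  unfold Spec_determineToolWriteOrder determineToolWriteOrder determineToolWriteOrder_alt
  cases hasPipes
  · simpa using pvFoldA_nopipe workflow []
  · simpa [pvPgo_nil] using pvFoldA_pipe' s workflow [] []
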